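-- pv_equiv track=rewrite | github.com/lewismcd1/py-port-scanner | scanner/scanner.py | classify_host_severity
-- ===== SOURCE A (Python) =====
-- def classify_host_severity(open_ports):
--     """Classifies the host's overall severity based on open ports."""
--     severity_order = ["critical", "high", "medium", "low"]
--     # This is to keep track of the highest severity found
--     highest_severity = "low"
--
--     # Iterate over open ports and update highest_severity if needed
--     for proto in open_ports:
--         for port_info in open_ports[proto]:
--             severity = port_info.get("severity", "low")
--             if severity in severity_order:
--                 # Update highest_severity if the current severity is higher
--                 if severity_order.index(severity) < severity_order.index(highest_severity):
--                     highest_severity = severity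
--
--     return highest_severity
-- ===== SOURCE B (Python) =====
-- def classify_host_severity(open_ports):
--     """Classifies the host's overall severity based on open ports."""
--     present = set()
--     for infos in open_ports.values():
--         for port_info in infos:
--             present.add(port_info.get("severity", "low"))
--     for level in ["critical", "high", "medium", "low"]:
--         if level in present:
--             return level
--     return "low"
-- ===== Notes on version B (the rewrite author's own statement) =====
-- stated objective: simpler
-- what changed: Replaces the running-minimum-by-index accumulator (with repeated list.index calls per entry) by a two-phase collect-then-scan: gather all severities into a set in one sweep, then return the first level of the fixed priority list that is present.
import Mathlib
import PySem

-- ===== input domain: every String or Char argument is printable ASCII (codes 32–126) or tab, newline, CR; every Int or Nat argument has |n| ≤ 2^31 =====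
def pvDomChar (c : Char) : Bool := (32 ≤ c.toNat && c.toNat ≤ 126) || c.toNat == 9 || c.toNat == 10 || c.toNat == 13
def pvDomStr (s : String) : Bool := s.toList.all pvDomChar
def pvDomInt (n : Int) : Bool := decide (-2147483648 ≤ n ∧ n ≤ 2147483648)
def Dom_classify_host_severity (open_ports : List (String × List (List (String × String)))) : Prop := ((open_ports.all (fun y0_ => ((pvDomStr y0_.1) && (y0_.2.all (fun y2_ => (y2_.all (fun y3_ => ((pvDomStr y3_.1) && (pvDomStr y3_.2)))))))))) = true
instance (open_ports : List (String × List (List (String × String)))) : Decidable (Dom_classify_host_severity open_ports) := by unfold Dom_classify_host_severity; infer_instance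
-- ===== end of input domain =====

-- B replaces A's running-minimum-by-severity-index accumulator by a two-phase collect-into-a-set
-- then scan-the-fixed-priority-list structure (objective: simpler decomposition, same result).


-- ===== PORT A =====
def sevOrderA : List String := ["critical", "high", "medium", "low"]

-- step for step: for proto in open_ports: for port_info in open_ports[proto]: …
-- open_ports[proto] is ported as Dict.getD with default [] — the key comes from the dict itself,
-- so the lookup never raises in Python and the default is never used; likewise the two
-- severity_order.index calls are ported as (index? …).getD 0 — both arguments are guaranteed
-- members of severity_order at that point, so Python's .index never raises.
def classify_host_severity (open_ports : List (String × List (List (String × String)))) : String :=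
  open_ports.foldl (fun highest_severity y =>
    ((PySem.Dict.mk open_ports).getD y.1 []).foldl (fun highest_severity port_info =>
      let severity := (PySem.Dict.mk port_info).getD "severity" "low"
      if severity ∈ sevOrderA then
        if (PySem.List.index? sevOrderA severity).getD 0 < (PySem.List.index? sevOrderA highest_severity).getD 0 then
          severity
        else highest_severity
      else highest_severity) highest_severity) "low"

-- ===== PORT B =====
-- for level in [...]: if level in present: return level / return "low"
def pvScanB (present : PySem.Set String) : List String → String
  | [] => "low"
  | level :: rest => if present.contains level then level else pvScanB present rest

def classify_host_severity_alt (open_ports : List (String × List (List (String × String)))) : String :=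
  let present : PySem.Set String :=
    open_ports.foldl (fun s y =>
      y.2.foldl (fun s port_info =>
        PySem.Set.add s ((PySem.Dict.mk port_info).getD "severity" "low")) s) PySem.Set.empty
  pvScanB present ["critical", "high", "medium", "low"]

-- ===== PRECONDITION & SPEC =====
-- Pre_ excludes association lists with duplicate proto keys: those do not represent any Python
-- dict (a dict's keys are unique), and on them A's per-key lookup and B's direct value iteration
-- would see different multisets of entries.
def Pre_classify_host_severity (open_ports : List (String × List (List (String × String)))) : Prop :=
  (open_ports.map (·.1)).Nodup
instance (open_ports : List (String × List (List (String × String)))) : Decidable (Pre_classify_host_severity open_ports) := by unfold Pre_classify_host_severity; infer_instance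

def pvWitness_classify_host_severity : (List (String × List (List (String × String)))) :=
  [("tcp", [[("severity", "high")], [("port", "80")]]), ("udp", [[("severity", "medium")]])]

def Spec_classify_host_severity (open_ports : List (String × List (List (String × String)))) (out : String) : Prop := out = classify_host_severity_alt open_ports
instance (open_ports : List (String × List (List (String × String)))) (out : String) : Decidable (Spec_classify_host_severity open_ports out) := by unfold Spec_classify_host_severity; infer_instance

-- ===== CLAIM (what is proved, stated in full; the proofs are below) =====
def Claim_equal_classify_host_severity : Prop := ∀ (open_ports : List (String × List (List (String × String)))), Dom_classify_host_severity open_ports → Pre_classify_host_severity open_ports → Spec_classify_host_severity open_ports (classify_host_severity open_ports)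

-- ===== LEMMAS AND PROOFS =====

-- rank of a severity string; 4 = not a recognised severity
def pvRnk (s : String) : Nat :=
  if s = "critical" then 0 else if s = "high" then 1 else if s = "medium" then 2
  else if s = "low" then 3 else 4

def pvUnrnk (n : Nat) : String :=
  if n = 0 then "critical" else if n = 1 then "high" else if n = 2 then "medium" else "low"

-- A's inner update step
def pvUpd (hs x : String) : String :=
  if x ∈ sevOrderA then
    if (PySem.List.index? sevOrderA x).getD 0 < (PySem.List.index? sevOrderA hs).getD 0 then x
    else hs
  else hs

-- all severities mentioned, in order
def pvSevs (open_ports : List (String × List (List (String × String)))) : List String :=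
  open_ports.flatMap (fun y => y.2.map (fun pi => (PySem.Dict.mk pi).getD "severity" "low"))

-- minimum rank occurring in a list (4 if none recognised)
def pvMr : List String → Nat
  | [] => 4
  | x :: t => min (pvRnk x) (pvMr t)

lemma pvMem_order_iff (s : String) : s ∈ sevOrderA ↔ pvRnk s ≤ 3 := by
  simp only [sevOrderA, List.mem_cons, List.not_mem_nil, or_false, pvRnk]
  split_ifs with h1 h2 h3 h4 <;> simp_all

lemma pvUpd_mem (hs x : String) (h : hs ∈ sevOrderA) : pvUpd hs x ∈ sevOrderA := by
  unfold pvUpd; split_ifs with h1 h2 <;> first | exact h1 | exact h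

lemma pvUnrnk_rnk (hs : String) (h : hs ∈ sevOrderA) : pvUnrnk (pvRnk hs) = hs := by
  simp only [sevOrderA, List.mem_cons, List.not_mem_nil, or_false] at h
  rcases h with h | h | h | h <;> subst h <;> decide

lemma pvRnk_upd (hs x : String) (h : hs ∈ sevOrderA) :
    pvRnk (pvUpd hs x) = min (pvRnk hs) (pvRnk x) := by
  by_cases hx : x ∈ sevOrderA
  · simp only [sevOrderA, List.mem_cons, List.not_mem_nil, or_false] at h hx
    rcases h with h | h | h | h <;> rcases hx with hx | hx | hx | hx <;>
      subst h <;> subst hx <;> decide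
  · have h4 : pvRnk x = 4 := by
      have := (pvMem_order_iff x).not.mp hx
      unfold pvRnk at *; split_ifs at * <;> omega
    have h3 : pvRnk hs ≤ 3 := (pvMem_order_iff hs).mp h
    unfold pvUpd
    rw [if_neg hx, h4]
    omega

lemma pvFoldA (l : List String) (hs : String) (h : hs ∈ sevOrderA) :
    l.foldl pvUpd hs = pvUnrnk (min (pvRnk hs) (pvMr l)) := by
  induction l generalizing hs with
  | nil =>
    have h3 : pvRnk hs ≤ 3 := (pvMem_order_iff hs).mp h
    simp only [List.foldl_nil, pvMr]
    rw [Nat.min_eq_left (by omega)]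
    exact (pvUnrnk_rnk hs h).symm
  | cons x t ih =>
    simp only [List.foldl_cons, pvMr]
    rw [ih (pvUpd hs x) (pvUpd_mem hs x h), pvRnk_upd hs x h, Nat.min_assoc]

lemma pvMr_le_of_mem {x : String} {l : List String} (h : x ∈ l) : pvMr l ≤ pvRnk x := by
  induction l with
  | nil => cases h
  | cons y t ih =>
    rcases List.mem_cons.mp h with h | h
    · subst h; simp [pvMr]
    · simp only [pvMr]; exact le_trans (Nat.min_le_right _ _) (ih h)

lemma pvMr_cases (l : List String) : pvMr l = 4 ∨ ∃ x ∈ l, pvRnk x = pvMr l := by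
  induction l with
  | nil => left; rfl
  | cons y t ih =>
    simp only [pvMr]
    rcases ih with h | ⟨x, hx, hr⟩
    · rw [h]
      by_cases hy : pvRnk y ≤ 4
      · right; exact ⟨y, List.mem_cons_self, by omega⟩
      · unfold pvRnk at hy; split_ifs at hy <;> omega
    · by_cases hc : pvRnk y ≤ pvRnk x
      · right; exact ⟨y, List.mem_cons_self, by omega⟩
      · right; exact ⟨x, List.mem_cons_of_mem _ hx, by omega⟩

lemma pvRnk_eq_iff (x : String) (n : Nat) (hn : n ≤ 3) :
    pvRnk x = n → x = pvUnrnk n := by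
  intro h
  unfold pvRnk at h
  split_ifs at h with h1 h2 h3 h4
  · subst h1; rw [← h]; rfl
  · subst h2; rw [← h]; rfl
  · subst h3; rw [← h]; rfl
  · subst h4; rw [← h]; rfl
  · omega

-- the set built by B has exactly the members of pvSevs
lemma pvMem_build (open_ports : List (String × List (List (String × String))))
    (s : PySem.Set String) (x : String) :
    x ∈ open_ports.foldl (fun s y =>
      y.2.foldl (fun s pi => PySem.Set.add s ((PySem.Dict.mk pi).getD "severity" "low")) s) s ↔
    x ∈ s ∨ x ∈ pvSevs open_ports := by
  induction open_ports generalizing s with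
  | nil => simp [pvSevs]
  | cons y t ih =>
    simp only [List.foldl_cons, ih, pvSevs, List.flatMap_cons, List.mem_append, List.mem_map]
    have inner : ∀ (l : List (List (String × String))) (s : PySem.Set String),
        x ∈ l.foldl (fun s pi => PySem.Set.add s ((PySem.Dict.mk pi).getD "severity" "low")) s ↔
        x ∈ s ∨ ∃ pi ∈ l, (PySem.Dict.mk pi).getD "severity" "low" = x := by
      intro l
      induction l with
      | nil => simp
      | cons pi t' ih' =>
        intro s
        simp only [List.foldl_cons, ih', PySem.Set.mem_add]
        constructor
        · rintro (⟨h | h⟩ | ⟨pi', h1, h2⟩)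
          · exact Or.inl h
          · exact Or.inr ⟨pi, List.mem_cons_self, h.symm⟩
          · exact Or.inr ⟨pi', List.mem_cons_of_mem _ h1, h2⟩
        · rintro (h | ⟨pi', h1, h2⟩)
          · exact Or.inl (Or.inl h)
          · rcases List.mem_cons.mp h1 with h1 | h1
            · subst h1; exact Or.inl (Or.inr h2.symm)
            · exact Or.inr ⟨pi', h1, h2⟩
    rw [inner]
    exact or_assoc

-- the nested fold of A equals the flat fold over pvSevs
lemma pvFlatten (open_ports : List (String × List (List (String × String)))) (hs : String) :
    open_ports.foldl (fun hs y =>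
      y.2.foldl (fun hs pi => pvUpd hs ((PySem.Dict.mk pi).getD "severity" "low")) hs) hs =
    (pvSevs open_ports).foldl pvUpd hs := by
  induction open_ports generalizing hs with
  | nil => rfl
  | cons y t ih =>
    simp only [List.foldl_cons]
    rw [ih]
    simp only [pvSevs, List.flatMap_cons, List.foldl_append, List.foldl_map]

-- under Pre_, A's dict lookup of y.1 returns y.2
lemma pvLookup (open_ports : List (String × List (List (String × String))))
    (hpre : (open_ports.map (·.1)).Nodup) (y : String × List (List (String × String)))
    (hy : y ∈ open_ports) : (PySem.Dict.mk open_ports).getD y.1 [] = y.2 := by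
  have hget : (PySem.Dict.mk open_ports).get? y.1 = some y.2 :=
    PySem.Dict.get?_of_mem_items (PySem.Dict.mk open_ports) hy hpre
  simp [PySem.Dict.getD, hget]

lemma pvScanB_eq (present : PySem.Set String) (m : Nat)
    (hub : ∀ n, n ≤ 2 → pvUnrnk n ∈ present → m ≤ n)
    (hlb : ∀ n, n ≤ 2 → m = n → pvUnrnk n ∈ present) :
    pvScanB present ["critical", "high", "medium", "low"] = pvUnrnk (min 3 m) := by
  have hc0 := hub 0 (by omega); have hc0' := hlb 0 (by omega)
  have hc1 := hub 1 (by omega); have hc1' := hlb 1 (by omega)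
  have hc2 := hub 2 (by omega); have hc2' := hlb 2 (by omega)
  simp only [pvUnrnk] at hc0 hc0' hc1 hc1' hc2 hc2'
  norm_num at hc0 hc0' hc1 hc1' hc2 hc2'
  simp only [pvScanB, PySem.Set.contains_eq_listContains, List.contains_eq_mem]
  by_cases h0 : "critical" ∈ present
  · have : m = 0 := by have := hc0 h0; omega
    subst this; simp [h0, pvUnrnk]
  · by_cases h1 : "high" ∈ present
    · have hm0 : ¬ m = 0 := fun h => h0 (hc0' h)
      have : m = 1 := by have := hc1 h1; omega
      subst this; simp [h0, h1, pvUnrnk]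
    · by_cases h2 : "medium" ∈ present
      · have hm0 : ¬ m = 0 := fun h => h0 (hc0' h)
        have hm1 : ¬ m = 1 := fun h => h1 (hc1' h)
        have : m = 2 := by have := hc2 h2; omega
        subst this; simp [h0, h1, h2, pvUnrnk]
      · have hm0 : ¬ m = 0 := fun h => h0 (hc0' h)
        have hm1 : ¬ m = 1 := fun h => h1 (hc1' h)
        have hm2 : ¬ m = 2 := fun h => h2 (hc2' h)
        have h3m : min 3 m = 3 := by omega
        by_cases h3 : "low" ∈ present <;> simp [h0, h1, h2, h3, h3m, pvUnrnk]

-- ===== VERDICT (by name: the statement is the Claim_ definition above) =====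
theorem classify_host_severity_spec : Claim_equal_classify_host_severity := by
  intro open_ports _hdom hpre
  unfold Spec_classify_host_severity
  unfold Pre_classify_host_severity at hpre
  -- A side: rewrite lookups, flatten, evaluate the fold
  have hA : classify_host_severity open_ports = pvUnrnk (min 3 (pvMr (pvSevs open_ports))) := by
    unfold classify_host_severity
    rw [PySem.List.foldl_congr_mem _ _ _ _ (fun hs y hy => by rw [pvLookup open_ports hpre y hy])]
    rw [show (3 : Nat) = pvRnk "low" from rfl, ← pvFoldA (pvSevs open_ports) "low" (by decide),
      ← pvFlatten open_ports "low"]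
    rfl
  rw [hA]
  -- B side
  unfold classify_host_severity_alt
  set present := open_ports.foldl (fun s y =>
      y.2.foldl (fun s pi => PySem.Set.add s ((PySem.Dict.mk pi).getD "severity" "low")) s)
      PySem.Set.empty with hp
  have hmemb : ∀ x, x ∈ present ↔ x ∈ pvSevs open_ports := by
    intro x
    rw [hp, pvMem_build]
    simp [PySem.Set.empty]
  rw [pvScanB_eq present (pvMr (pvSevs open_ports))]
  · intro n hn hmem
    rw [hmemb] at hmem
    have h1 : pvMr (pvSevs open_ports) ≤ pvRnk (pvUnrnk n) := pvMr_le_of_mem hmem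
    have h2 : pvRnk (pvUnrnk n) = n := by interval_cases n <;> decide
    omega
  · intro n hn heq
    rw [hmemb]
    rcases pvMr_cases (pvSevs open_ports) with h4 | ⟨x, hx, hr⟩
    · omega
    · have := pvRnk_eq_iff x n (by omega) (by omega)
      subst this
      exact hx
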